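-- pv_equiv track=rewrite | github.com/kuznetzdev/cashback_bot | project/services/db.py | _calculate_level
-- ===== SOURCE A (Python) =====
-- from typing import Any, AsyncIterator, Iterable, Sequence
--
-- _LEVEL_THRESHOLDS: Sequence[tuple[str, int]] = (
--     ("Bronze", 0),
--     ("Silver", 10),
--     ("Gold", 30),
--     ("Diamond", 60),
-- )
--
-- def _calculate_level(points: int) -> str:
--     level = "Bronze"
--     for name, threshold in _LEVEL_THRESHOLDS:
--         if points >= threshold:
--             level = name
--         else:
--             break
--     return level
-- ===== SOURCE B (Python) =====
-- import bisect
--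
-- _LEVEL_THRESHOLDS = (
--     ("Bronze", 0),
--     ("Silver", 10),
--     ("Gold", 30),
--     ("Diamond", 60),
-- )
--
-- _NAMES = [name for name, _ in _LEVEL_THRESHOLDS]
-- _VALUES = [value for _, value in _LEVEL_THRESHOLDS]
--
-- def _calculate_level(points: int) -> str:
--     idx = max(0, bisect.bisect_right(_VALUES, points) - 1)
--     return _NAMES[idx]
-- ===== Notes on version B (the rewrite author's own statement) =====
-- stated objective: idiomatic
-- what changed: Replaces the linear scan-with-break over (name, threshold) pairs by precomputed parallel name/value lists and a bisect_right index lookup clamped at 0.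
import Mathlib
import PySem

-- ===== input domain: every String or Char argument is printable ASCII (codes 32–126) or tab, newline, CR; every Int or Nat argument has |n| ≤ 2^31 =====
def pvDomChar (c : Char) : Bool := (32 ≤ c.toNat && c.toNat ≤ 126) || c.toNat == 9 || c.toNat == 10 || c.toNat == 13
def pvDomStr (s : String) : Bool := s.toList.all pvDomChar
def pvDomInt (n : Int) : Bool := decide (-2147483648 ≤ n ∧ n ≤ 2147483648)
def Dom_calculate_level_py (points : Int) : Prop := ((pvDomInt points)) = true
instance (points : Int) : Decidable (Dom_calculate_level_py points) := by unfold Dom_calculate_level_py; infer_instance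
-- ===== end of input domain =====

-- B replaces A's linear scan-with-break by parallel precomputed lists and a clamped
-- bisect_right lookup (idiomatic; return value only, no side effects involved).

-- ===== PORT A =====
def levelThresholds : List (String × Int) :=
  [("Bronze", 0), ("Silver", 10), ("Gold", 30), ("Diamond", 60)]

-- the for-loop with break, as structural recursion over the remaining pairs
def aLoop (points : Int) (level : String) : List (String × Int) → String
  | [] => level
  | (name, threshold) :: rest =>
      if points ≥ threshold then aLoop points name rest else level

def calculate_level_py (points : Int) : String :=
  aLoop points "Bronze" levelThresholds

-- ===== PORT B =====
def pvNames : List String := levelThresholds.map Prod.fst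
def pvValues : List Int := levelThresholds.map Prod.snd

-- bisect.bisect_right on a sorted list = number of elements ≤ points
def bisectRight (xs : List Int) (x : Int) : Nat :=
  xs.countP (fun v => decide (v ≤ x))

def calculate_level_py_alt (points : Int) : String :=
  let idx := max 0 (bisectRight pvValues points - 1)
  pvNames.getD idx ""

-- ===== PRECONDITION & SPEC =====
def Spec_calculate_level_py (points : Int) (out : String) : Prop := out = calculate_level_py_alt points
instance (points : Int) (out : String) : Decidable (Spec_calculate_level_py points out) := by unfold Spec_calculate_level_py; infer_instance

-- ===== CLAIM (what is proved, stated in full; the proofs are below) =====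
def Claim_equal_calculate_level_py : Prop := ∀ (points : Int), Dom_calculate_level_py points → Spec_calculate_level_py points (calculate_level_py points)

-- ===== LEMMAS AND PROOFS =====

-- ===== VERDICT (by name: the statement is the Claim_ definition above) =====
theorem calculate_level_py_spec : Claim_equal_calculate_level_py := by
  intro points _
  unfold Spec_calculate_level_py calculate_level_py calculate_level_py_alt
  simp only [levelThresholds, pvNames, pvValues, bisectRight, aLoop, List.map,
    List.countP, List.countP.go]
  split_ifs with a b c d
  · simp [a,b,c,d]
  · simp [a,b,c,d]
  · have h60 : ¬ (60 ≤ points) := by omega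
    simp [a,b,c,h60]
  · have h30 : ¬ (30 ≤ points) := by omega
    have h60 : ¬ (60 ≤ points) := by omega
    simp [a,b,h30,h60]
  · have h10 : ¬ (10 ≤ points) := by omega
    have h30 : ¬ (30 ≤ points) := by omega
    have h60 : ¬ (60 ≤ points) := by omega
    simp [a,h10,h30,h60]
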